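-- pv_equiv track=rewrite | github.com/yoksamutr/grader | 07/07_​StrFile_​32.py | letter_sequence
-- ===== SOURCE A (Python) =====
-- def letter_sequence(p):
--     abc="abcdefghijklmnopqrstuvwxyz"
--     cba=abc[-1::-1]
--     for i in range(len(p)-3):
--         str1=p[i:i+4].lower()
--         if str1 in abc or str1 in cba:
--             return True
--     return False
-- ===== SOURCE B (Python) =====
-- def _adj(a, b):
--     return 'a' <= a <= 'z' and 'a' <= b <= 'z' and ord(b) - ord(a) == 1
--
--
-- def letter_sequence(p):
--     s = p.lower()
--     up = 1
--     down = 1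
--     for i in range(1, len(s)):
--         prev, cur = s[i - 1], s[i]
--         up = up + 1 if _adj(prev, cur) else 1
--         down = down + 1 if _adj(cur, prev) else 1
--         if up >= 4 or down >= 4:
--             return True
--     return False
-- ===== Notes on version B (the rewrite author's own statement) =====
-- stated objective: alternative
-- what changed: A slices a 4-character window at every index and tests it as a substring of the alphabet string and its reverse; B lowercases once and makes a single pass over adjacent character pairs, maintaining ascending and descending run counters and returning True when either reaches 4.
import Mathlib
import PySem

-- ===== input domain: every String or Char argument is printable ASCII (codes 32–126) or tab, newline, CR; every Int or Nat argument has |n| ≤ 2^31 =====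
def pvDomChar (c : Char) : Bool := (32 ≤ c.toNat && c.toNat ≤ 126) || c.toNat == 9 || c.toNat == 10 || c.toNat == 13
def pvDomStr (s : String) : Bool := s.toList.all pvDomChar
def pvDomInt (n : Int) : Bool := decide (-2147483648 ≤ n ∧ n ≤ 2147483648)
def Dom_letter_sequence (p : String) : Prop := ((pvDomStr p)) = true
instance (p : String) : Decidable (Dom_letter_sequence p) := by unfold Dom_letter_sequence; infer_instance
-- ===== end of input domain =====

-- B replaces A's per-window substring search in the alphabet by a single pass with two run counters (ascending/descending); same return value, alternative algorithm.


-- ===== PORT A =====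
def pvAbc : String := "abcdefghijklmnopqrstuvwxyz"
-- abc[-1::-1]; the step -1 is nonzero so slice? always returns some; getD only discharges the Option
def pvCba : String := (PySem.Str.slice? pvAbc (some (-1)) none (-1)).getD ""
def pvALoop (p : String) : List Int → Bool
  | [] => false
  | i :: rest =>
    let str1 := PySem.Str.lower (PySem.Str.slice p (some i) (some (i + 4)))
    if PySem.Str.isIn str1 pvAbc || PySem.Str.isIn str1 pvCba then true
    else pvALoop p rest
def letter_sequence (p : String) : Bool :=
  pvALoop p (PySem.List.pyRange 0 (PySem.Str.len p - 3) 1)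

-- ===== PORT B =====
def pvAdj (a b : Char) : Bool :=
  decide ('a' ≤ a) && decide (a ≤ 'z') && decide ('a' ≤ b) && decide (b ≤ 'z') &&
    ((b.toNat : Int) - (a.toNat : Int) == 1)
def pvBLoop : List Char → Char → Nat → Nat → Bool
  | [], _, _, _ => false
  | cur :: rest, prev, up, down =>
    let up' := if pvAdj prev cur then up + 1 else 1
    let down' := if pvAdj cur prev then down + 1 else 1
    if up' ≥ 4 || down' ≥ 4 then true else pvBLoop rest cur up' down'
def letter_sequence_alt (p : String) : Bool :=
  match (PySem.Str.lower p).toList with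
  | [] => false
  | c :: rest => pvBLoop rest c 1 1

-- ===== PRECONDITION & SPEC =====
def Spec_letter_sequence (p : String) (out : Bool) : Prop := out = letter_sequence_alt p
instance (p : String) (out : Bool) : Decidable (Spec_letter_sequence p out) := by unfold Spec_letter_sequence; infer_instance

-- ===== CLAIM (what is proved, stated in full; the proofs are below) =====
def Claim_equal_letter_sequence : Prop := ∀ (p : String), Dom_letter_sequence p → Spec_letter_sequence p (letter_sequence p)

-- ===== LEMMAS AND PROOFS =====

-- window test: the first four elements form an adj-chain
def pvHead4 (adj : Char → Char → Bool) : List Char → Bool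
  | a :: b :: c :: d :: _ => adj a b && adj b c && adj c d
  | _ => false
-- some window of four forms an adj-chain
def pvRun4 (adj : Char → Char → Bool) : List Char → Bool
  | [] => false
  | x :: t => pvHead4 adj (x :: t) || pvRun4 adj t

-- the adj-run recorded by a counter value pad.length + 1 ending at `prev`
def pvPadOK (adj : Char → Char → Bool) : List Char → Char → Prop
  | [], _ => True
  | [x], p => adj x p = true
  | [x, y], p => adj x y = true ∧ adj y p = true
  | _, _ => False

def abcL : List Char := ['a','b','c','d','e','f','g','h','i','j','k','l','m','n','o','p','q','r','s','t','u','v','w','x','y','z']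
theorem abc_toList : pvAbc.toList = abcL := by decide
theorem cba_toList : pvCba.toList = abcL.reverse := by decide

theorem chle (a b : Char) : (a ≤ b) ↔ a.toNat ≤ b.toNat := by
  rw [Char.le_def, UInt32.le_iff_toNat_le]; constructor <;> intro h <;> exact h

theorem pvAdj_iff (a b : Char) :
    pvAdj a b = true ↔ 97 ≤ a.toNat ∧ b.toNat ≤ 122 ∧ b.toNat = a.toNat + 1 := by
  simp only [pvAdj, Bool.and_eq_true, decide_eq_true_eq, beq_iff_eq, chle]
  constructor
  · rintro ⟨⟨⟨⟨h1, h2⟩, h3⟩, h4⟩, h5⟩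
    refine ⟨by simpa using h1, by simpa using h4, by omega⟩
  · rintro ⟨h1, h2, h3⟩
    refine ⟨⟨⟨⟨by simpa using h1, ?_⟩, ?_⟩, by simpa using h2⟩, by omega⟩ <;> simp <;> omega

theorem char_of_toNat (c : Char) (n : Nat) (h : c.toNat = n) : c = Char.ofNat n := by
  rw [← h, Char.ofNat_toNat]

theorem toNat_ofNat_small (n : Nat) (h : n ≤ 123) : (Char.ofNat n).toNat = n := by
  rw [Char.toNat_ofNat]
  have : n.isValidChar := Or.inl (by omega)
  simp [this]

theorem infix_abc (a b c d : Char) :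
    [a, b, c, d] <:+: pvAbc.toList ↔ (pvAdj a b && pvAdj b c && pvAdj c d) = true := by
  rw [abc_toList]
  constructor
  · intro h
    rw [← PySem.Chars.isIn_iff_infix, ← PySem.Chars.exists_prefix_drop_iff_isIn] at h
    obtain ⟨j, hj⟩ := h
    have hlen := hj.length_le
    have hj22 : j ≤ 22 := by
      by_contra hc
      have hd : (List.drop j abcL).length = 26 - j := by simp [abcL]
      rw [hd] at hlen; simp at hlen; omega
    interval_cases j <;>
      · simp only [abcL, List.drop, List.cons_prefix_cons, List.nil_prefix, and_true] at hj
        obtain ⟨rfl, rfl, rfl, rfl⟩ := hj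
        decide
  · intro h
    simp only [Bool.and_eq_true, pvAdj_iff] at h
    obtain ⟨⟨⟨h1, h2, h3⟩, ⟨h4, h5, h6⟩⟩, ⟨h7, h8, h9⟩⟩ := h
    obtain ⟨n, hn1, hn2, rfl⟩ : ∃ n, 97 ≤ n ∧ n ≤ 119 ∧ a = Char.ofNat n :=
      ⟨a.toNat, h1, by omega, (Char.ofNat_toNat a).symm⟩
    rw [toNat_ofNat_small n (by omega)] at h3
    obtain rfl : b = Char.ofNat (n + 1) := char_of_toNat b _ h3
    rw [toNat_ofNat_small (n + 1) (by omega)] at h6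
    obtain rfl : c = Char.ofNat (n + 2) := char_of_toNat c _ (by omega)
    rw [toNat_ofNat_small (n + 2) (by omega)] at h9
    obtain rfl : d = Char.ofNat (n + 3) := char_of_toNat d _ (by omega)
    interval_cases n <;> decide

theorem infix_abc' (a b c d : Char) :
    [a, b, c, d] <:+: pvAbc.toList ↔
      pvAdj a b = true ∧ pvAdj b c = true ∧ pvAdj c d = true := by
  rw [infix_abc]; simp [Bool.and_eq_true, and_assoc]

theorem infix_cba' (a b c d : Char) :
    [a, b, c, d] <:+: pvCba.toList ↔
      pvAdj d c = true ∧ pvAdj c b = true ∧ pvAdj b a = true := by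
  rw [cba_toList]
  have h4 : ([d, c, b, a] : List Char).reverse = [a, b, c, d] := by simp
  rw [← h4, ← abc_toList, List.reverse_infix, infix_abc']

theorem pvHead4_short (adj : Char → Char → Bool) (l : List Char) (h : l.length < 4) :
    pvHead4 adj l = false := by
  rcases l with _ | ⟨a, _ | ⟨b, _ | ⟨c, _ | ⟨d, t⟩⟩⟩⟩
  · rfl
  · rfl
  · rfl
  · rfl
  · simp at h; omega

theorem pvRun4_short (adj : Char → Char → Bool) (l : List Char) (h : l.length < 4) :
    pvRun4 adj l = false := by
  induction l with
  | nil => rfl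
  | cons x t ih =>
    simp only [pvRun4]
    rw [pvHead4_short adj _ h, ih (by simp at h ⊢; omega)]
    rfl

theorem pvRun4_eq_any (adj : Char → Char → Bool) (l : List Char) :
    pvRun4 adj l = (List.range (l.length - 3)).any (fun i => pvHead4 adj (l.drop i)) := by
  induction l with
  | nil => rfl
  | cons x t ih =>
    by_cases h3 : 3 ≤ t.length
    · have hr : (x :: t).length - 3 = (t.length - 3) + 1 := by simp; omega
      rw [hr, List.range_succ_eq_map]
      simp only [pvRun4, List.any_cons, List.any_map, List.drop_zero]
      rw [ih]
      simp only [Function.comp_def, Nat.succ_eq_add_one, List.drop_succ_cons]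
    · have hr : (x :: t).length - 3 = 0 := by simp; omega
      rw [hr]
      simp only [List.range_zero, List.any_nil]
      exact pvRun4_short adj _ (by simp; omega)

theorem pvHead4_false₁ (adj : Char → Char → Bool) (prev cur : Char) (r : List Char)
    (h : adj prev cur = false) : pvHead4 adj (prev :: cur :: r) = false := by
  rcases r with _ | ⟨z, _ | ⟨w, r⟩⟩ <;> simp [pvHead4, h]

theorem pvHead4_false₂ (adj : Char → Char → Bool) (y prev cur : Char) (r : List Char)
    (h : adj prev cur = false) : pvHead4 adj (y :: prev :: cur :: r) = false := by
  rcases r with _ | ⟨z, r⟩ <;> simp [pvHead4, h]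

theorem pvRun4_drop_pad (adj : Char → Char → Bool) (pad : List Char) (prev cur : Char)
    (r : List Char) (hlen : pad.length ≤ 2) (hadj : adj prev cur = false) :
    pvRun4 adj (pad ++ prev :: cur :: r) = pvRun4 adj (cur :: r) := by
  rcases pad with _ | ⟨x, _ | ⟨y, _ | ⟨z, t⟩⟩⟩
  · simp only [List.nil_append, pvRun4]
    rw [pvHead4_false₁ adj prev cur r hadj]
    rfl
  · simp only [List.cons_append, List.nil_append, pvRun4]
    rw [pvHead4_false₂ adj x prev cur r hadj, pvHead4_false₁ adj prev cur r hadj]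
    rfl
  · simp only [List.cons_append, List.nil_append, pvRun4]
    rw [pvHead4_false₂ adj y prev cur r hadj, pvHead4_false₁ adj prev cur r hadj]
    have hx : pvHead4 adj (x :: y :: prev :: cur :: r) = (adj x y && adj y prev && adj prev cur) := rfl
    rw [hx, hadj]
    simp
  · simp at hlen

theorem pvPadOK_length (adj : Char → Char → Bool) (pad : List Char) (p : Char)
    (h : pvPadOK adj pad p) : pad.length ≤ 2 := by
  rcases pad with _ | ⟨x, _ | ⟨y, _ | ⟨z, t⟩⟩⟩ <;> simp_all [pvPadOK]

theorem pvAdj_asymm (a b : Char) (h1 : pvAdj a b = true) (h2 : pvAdj b a = true) : False := by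
  rw [pvAdj_iff] at h1 h2; omega

theorem pvBLoop_eq (rest : List Char) :
    ∀ (prev : Char) (padU padD : List Char),
    pvPadOK pvAdj padU prev → pvPadOK (fun x y => pvAdj y x) padD prev →
    pvBLoop rest prev (padU.length + 1) (padD.length + 1) =
      (pvRun4 pvAdj (padU ++ prev :: rest) ||
       pvRun4 (fun x y => pvAdj y x) (padD ++ prev :: rest)) := by
  induction rest with
  | nil =>
    intro prev padU padD hU hD
    have h1 := pvPadOK_length _ _ _ hU
    have h2 := pvPadOK_length _ _ _ hD
    rw [pvRun4_short _ _ (by simp; omega), pvRun4_short _ _ (by simp; omega)]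
    rfl
  | cons cur rest' ih =>
    intro prev padU padD hU hD
    have hUl := pvPadOK_length _ _ _ hU
    have hDl := pvPadOK_length _ _ _ hD
    cases hA : pvAdj prev cur with
    | true =>
      have hD2 : pvAdj cur prev = false := by
        cases h : pvAdj cur prev
        · rfl
        · exact absurd (pvAdj_asymm _ _ hA h) (fun x => x)
      rw [pvRun4_drop_pad _ padD prev cur rest' hDl hD2]
      rcases padU with _ | ⟨x, _ | ⟨y, _ | ⟨z, t⟩⟩⟩
      · have hstep : pvBLoop (cur :: rest') prev (([] : List Char).length + 1) (padD.length + 1) =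
            pvBLoop rest' cur 2 1 := by simp [pvBLoop, hA, hD2]
        rw [hstep]
        have h2 := ih cur [prev] [] hA trivial
        simp only [List.length_cons, List.length_nil] at h2
        rw [h2]
        simp
      · have hx : pvAdj x prev = true := hU
        have hstep : pvBLoop (cur :: rest') prev (([x] : List Char).length + 1) (padD.length + 1) =
            pvBLoop rest' cur 3 1 := by simp [pvBLoop, hA, hD2]
        rw [hstep]
        have h2 := ih cur [x, prev] [] ⟨hx, hA⟩ trivial
        simp only [List.length_cons, List.length_nil] at h2
        rw [h2]
        simp
      · obtain ⟨hxy, hyp⟩ := hU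
        have hstep : pvBLoop (cur :: rest') prev (([x, y] : List Char).length + 1) (padD.length + 1) =
            true := by simp [pvBLoop, hA, hD2]
        rw [hstep]
        have hw : pvHead4 pvAdj (x :: y :: prev :: cur :: rest') = true := by
          have : pvHead4 pvAdj (x :: y :: prev :: cur :: rest') =
              (pvAdj x y && pvAdj y prev && pvAdj prev cur) := rfl
          rw [this, hxy, hyp, hA]; rfl
        simp only [List.cons_append, List.nil_append, pvRun4, hw]
        simp
      · simp at hUl
    | false =>
      cases hDD : pvAdj cur prev with
      | true =>
        rw [pvRun4_drop_pad _ padU prev cur rest' hUl hA]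
        rcases padD with _ | ⟨x, _ | ⟨y, _ | ⟨z, t⟩⟩⟩
        · have hstep : pvBLoop (cur :: rest') prev (padU.length + 1) (([] : List Char).length + 1) =
              pvBLoop rest' cur 1 2 := by simp [pvBLoop, hA, hDD]
          rw [hstep]
          have h2 := ih cur [] [prev] trivial hDD
          simp only [List.length_cons, List.length_nil] at h2
          rw [h2]
          simp
        · have hx : pvAdj prev x = true := hD
          have hstep : pvBLoop (cur :: rest') prev (padU.length + 1) (([x] : List Char).length + 1) =
              pvBLoop rest' cur 1 3 := by simp [pvBLoop, hA, hDD]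
          rw [hstep]
          have h2 := ih cur [] [x, prev] trivial ⟨hx, hDD⟩
          simp only [List.length_cons, List.length_nil] at h2
          rw [h2]
          simp
        · obtain ⟨hxy, hyp⟩ := hD
          have hstep : pvBLoop (cur :: rest') prev (padU.length + 1) (([x, y] : List Char).length + 1) =
              true := by simp [pvBLoop, hA, hDD]
          rw [hstep]
          have hw : pvHead4 (fun u v => pvAdj v u) (x :: y :: prev :: cur :: rest') = true := by
            have : pvHead4 (fun u v => pvAdj v u) (x :: y :: prev :: cur :: rest') =
                (pvAdj y x && pvAdj prev y && pvAdj cur prev) := rfl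
            rw [this]
            simp only at hxy hyp
            rw [hxy, hyp, hDD]; rfl
          simp only [List.cons_append, List.nil_append, pvRun4, hw]
          simp
        · simp at hDl
      | false =>
        rw [pvRun4_drop_pad _ padU prev cur rest' hUl hA,
          pvRun4_drop_pad _ padD prev cur rest' hDl hDD]
        have hstep : pvBLoop (cur :: rest') prev (padU.length + 1) (padD.length + 1) =
            pvBLoop rest' cur 1 1 := by
          simp [pvBLoop, hA, hDD]
        rw [hstep]
        have h2 := ih cur [] [] trivial trivial
        simp only [List.length_nil] at h2
        rw [h2]
        simp

theorem four_of_len {l : List Char} (h : 4 ≤ l.length) : ∃ a b c d t, l = a :: b :: c :: d :: t := by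
  rcases l with _ | ⟨a, _ | ⟨b, _ | ⟨c, _ | ⟨d, t⟩⟩⟩⟩ <;> simp at h ⊢

theorem aloop_any (p : String) (l : List Int) :
    pvALoop p l = l.any (fun i =>
      PySem.Str.isIn (PySem.Str.lower (PySem.Str.slice p (some i) (some (i + 4)))) pvAbc ||
      PySem.Str.isIn (PySem.Str.lower (PySem.Str.slice p (some i) (some (i + 4)))) pvCba) := by
  induction l with
  | nil => rfl
  | cons i t ih =>
    simp only [pvALoop, List.any_cons]
    cases hc : (PySem.Str.isIn (PySem.Str.lower (PySem.Str.slice p (some i) (some (i + 4)))) pvAbc ||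
        PySem.Str.isIn (PySem.Str.lower (PySem.Str.slice p (some i) (some (i + 4)))) pvCba) with
    | true => simp
    | false => simp [ih]

theorem lower_len (p : String) : (PySem.Str.lower p).toList.length = p.toList.length := by
  rw [PySem.Str.toList_lower]
  simp [PySem.Chars.lower]

theorem window_toList (p : String) (k : Nat) :
    (PySem.Str.lower (PySem.Str.slice p (some (k : Int)) (some ((k : Int) + 4)))).toList
      = (((PySem.Str.lower p).toList).drop k).take 4 := by
  rw [PySem.Str.toList_lower, PySem.Str.toList_slice, PySem.Str.toList_lower]
  have hs : PySem.Chars.slice p.toList (some (k : Int)) (some ((k : Int) + 4)) =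
      (p.toList.drop k).take 4 := by
    have := PySem.List.slice_natCast_add p.toList k 4
    simpa using this
  rw [hs]
  simp [PySem.Chars.lower, List.map_take, List.map_drop]

theorem cond_eq (p : String) (k : Nat) (hk : k + 4 ≤ p.toList.length) :
    (PySem.Str.isIn (PySem.Str.lower (PySem.Str.slice p (some (k : Int)) (some ((k : Int) + 4)))) pvAbc ||
     PySem.Str.isIn (PySem.Str.lower (PySem.Str.slice p (some (k : Int)) (some ((k : Int) + 4)))) pvCba) =
    (pvHead4 pvAdj (((PySem.Str.lower p).toList).drop k) ||
     pvHead4 (fun x y => pvAdj y x) (((PySem.Str.lower p).toList).drop k)) := by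
  have hlen : 4 ≤ (((PySem.Str.lower p).toList).drop k).length := by
    rw [List.length_drop, lower_len]; omega
  obtain ⟨a, b, c, d, t, hd⟩ := four_of_len hlen
  have hwin : (PySem.Str.lower (PySem.Str.slice p (some (k : Int)) (some ((k : Int) + 4)))).toList
      = [a, b, c, d] := by rw [window_toList, hd]; rfl
  rw [Bool.eq_iff_iff]
  simp only [Bool.or_eq_true, PySem.Str.isIn_eq, hwin, PySem.Chars.isIn_iff_infix, hd]
  have h1 : pvHead4 pvAdj (a :: b :: c :: d :: t) = (pvAdj a b && pvAdj b c && pvAdj c d) := rfl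
  have h2 : pvHead4 (fun x y => pvAdj y x) (a :: b :: c :: d :: t) =
      (pvAdj b a && pvAdj c b && pvAdj d c) := rfl
  rw [h1, h2, infix_abc' a b c d, infix_cba' a b c d]
  simp only [Bool.and_eq_true]
  constructor
  · rintro (⟨x1, x2, x3⟩ | ⟨x1, x2, x3⟩)
    · exact Or.inl ⟨⟨x1, x2⟩, x3⟩
    · exact Or.inr ⟨⟨x3, x2⟩, x1⟩
  · rintro (⟨⟨x1, x2⟩, x3⟩ | ⟨⟨x1, x2⟩, x3⟩)
    · exact Or.inl ⟨x1, x2, x3⟩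
    · exact Or.inr ⟨x3, x2, x1⟩

theorem A_iff (p : String) : letter_sequence p = true ↔
    ∃ k, k < p.toList.length - 3 ∧
      (pvHead4 pvAdj (((PySem.Str.lower p).toList).drop k) = true ∨
       pvHead4 (fun x y => pvAdj y x) (((PySem.Str.lower p).toList).drop k) = true) := by
  unfold letter_sequence
  rw [aloop_any, PySem.Str.len_eq, PySem.List.pyRange_one, List.any_map]
  have hn : (((p.toList.length : Int) - 3) - 0).toNat = p.toList.length - 3 := by omega
  rw [hn, List.any_eq_true]
  constructor
  · rintro ⟨k, hk, hc⟩
    rw [List.mem_range] at hk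
    refine ⟨k, hk, ?_⟩
    simp only [Function.comp_def, zero_add] at hc
    rw [cond_eq p k (by omega)] at hc
    simpa using hc
  · rintro ⟨k, hk, hc⟩
    refine ⟨k, List.mem_range.mpr hk, ?_⟩
    simp only [Function.comp_def, zero_add]
    rw [cond_eq p k (by omega)]
    simpa using hc

theorem B_iff (p : String) : letter_sequence_alt p =
    (pvRun4 pvAdj ((PySem.Str.lower p).toList) ||
     pvRun4 (fun x y => pvAdj y x) ((PySem.Str.lower p).toList)) := by
  unfold letter_sequence_alt
  cases hL : (PySem.Str.lower p).toList with
  | nil => rfl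
  | cons c rest =>
    have h := pvBLoop_eq rest c [] [] trivial trivial
    simp only [List.length_nil, List.nil_append] at h
    exact h

-- ===== VERDICT (by name: the statement is the Claim_ definition above) =====
theorem letter_sequence_spec : Claim_equal_letter_sequence := by
  intro p _
  show letter_sequence p = letter_sequence_alt p
  rw [B_iff, Bool.eq_iff_iff, A_iff]
  simp only [Bool.or_eq_true, pvRun4_eq_any, List.any_eq_true, List.mem_range, lower_len]
  constructor
  · rintro ⟨k, hk, hc | hc⟩
    · exact Or.inl ⟨k, hk, hc⟩
    · exact Or.inr ⟨k, hk, hc⟩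
  · rintro (⟨k, hk, hc⟩ | ⟨k, hk, hc⟩)
    · exact ⟨k, hk, Or.inl hc⟩
    · exact ⟨k, hk, Or.inr hc⟩
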